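-- pv_equiv track=rewrite | github.com/lingengyuan/TheAlgorithms-Zig | benchmarks/python_vs_zig/python_bench_all.py | segment_tree_workload
-- ===== SOURCE A (Python) =====
-- MASK_64 = (1 << 64) - 1
--
-- def signed_i64_to_u64(value: int) -> int:
--     return value & MASK_64
--
-- class SegmentTreeBench:
--     def __init__(self, values: list[int]) -> None:
--         self.n = len(values)
--         self.tree = [0] * (4 * self.n if self.n else 0)
--         if self.n:
--             self._build(1, 0, self.n - 1, values)
--
--     def _build(self, node: int, left: int, right: int, values: list[int]) -> None:
--         if left == right:
--             self.tree[node] = values[left]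
--             return
--         mid = left + ((right - left) // 2)
--         self._build(node * 2, left, mid, values)
--         self._build((node * 2) + 1, mid + 1, right, values)
--         self.tree[node] = max(self.tree[node * 2], self.tree[(node * 2) + 1])
--
--     def update(self, index: int, value: int) -> None:
--         self._update(1, 0, self.n - 1, index, value)
--
--     def _update(self, node: int, left: int, right: int, index: int, value: int) -> None:
--         if left == right:
--             self.tree[node] = value
--             return
--         mid = left + ((right - left) // 2)
--         if index <= mid:
--             self._update(node * 2, left, mid, index, value)
--         else:
--             self._update((node * 2) + 1, mid + 1, right, index, value)
--         self.tree[node] = max(self.tree[node * 2], self.tree[(node * 2) + 1])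
--
--     def query(self, ql: int, qr: int) -> int:
--         return self._query(1, 0, self.n - 1, ql, qr)
--
--     def _query(self, node: int, left: int, right: int, ql: int, qr: int) -> int:
--         if qr < left or right < ql:
--             return -(1 << 63)
--         if ql <= left and right <= qr:
--             return self.tree[node]
--         mid = left + ((right - left) // 2)
--         lv = self._query(node * 2, left, mid, ql, qr)
--         rv = self._query((node * 2) + 1, mid + 1, right, ql, qr)
--         return max(lv, rv)
--
-- def segment_tree_workload(values: list[int]) -> int:
--     if not values:
--         return 0
--     st = SegmentTreeBench(values)
--     n = len(values)
--     checksum = 0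
--
--     for i in range(0, n, 97):
--         left = i
--         right = min(n - 1, left + 63)
--         checksum = (checksum + signed_i64_to_u64(st.query(left, right))) & MASK_64
--
--     for i in range(0, n, 53):
--         index = ((i * 37) + 11) % n
--         value = (((i * 131) + 19) % 1_000_003) - 500_000
--         st.update(index, value)
--
--     for i in range(0, n, 89):
--         left = ((i * 17) + 5) % n
--         span = (((i * 29) + 7) % 64) + 1
--         right = min(n - 1, left + span - 1)
--         checksum = (checksum + signed_i64_to_u64(st.query(left, right))) & MASK_64
--
--     return checksum
-- ===== SOURCE B (Python) =====
-- MASK_64 = (1 << 64) - 1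
--
-- def segment_tree_workload(values: list[int]) -> int:
--     # Plain array instead of a segment tree: every query span is at most 64 wide,
--     # so a direct scan answers it; point updates are O(1) writes.
--     if not values:
--         return 0
--     n = len(values)
--     arr = list(values)
--     checksum = 0
--
--     for i in range(0, n, 97):
--         left = i
--         right = min(n - 1, left + 63)
--         m = arr[left]
--         for j in range(left + 1, right + 1):
--             if arr[j] > m:
--                 m = arr[j]
--         checksum = (checksum + (m & MASK_64)) & MASK_64
--
--     for i in range(0, n, 53):
--         arr[((i * 37) + 11) % n] = (((i * 131) + 19) % 1_000_003) - 500_000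
--
--     for i in range(0, n, 89):
--         left = ((i * 17) + 5) % n
--         span = (((i * 29) + 7) % 64) + 1
--         right = min(n - 1, left + span - 1)
--         m = arr[left]
--         for j in range(left + 1, right + 1):
--             if arr[j] > m:
--                 m = arr[j]
--         checksum = (checksum + (m & MASK_64)) & MASK_64
--
--     return checksum
-- ===== Notes on version B (the rewrite author's own statement) =====
-- stated objective: faster
-- what changed: Replaced the segment tree (O(n) build, recursive O(log n) queries/updates) by the plain array itself: every query span is at most 64 wide so each query is a direct scan, and each point update is a single O(1) write.
import Mathlib
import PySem

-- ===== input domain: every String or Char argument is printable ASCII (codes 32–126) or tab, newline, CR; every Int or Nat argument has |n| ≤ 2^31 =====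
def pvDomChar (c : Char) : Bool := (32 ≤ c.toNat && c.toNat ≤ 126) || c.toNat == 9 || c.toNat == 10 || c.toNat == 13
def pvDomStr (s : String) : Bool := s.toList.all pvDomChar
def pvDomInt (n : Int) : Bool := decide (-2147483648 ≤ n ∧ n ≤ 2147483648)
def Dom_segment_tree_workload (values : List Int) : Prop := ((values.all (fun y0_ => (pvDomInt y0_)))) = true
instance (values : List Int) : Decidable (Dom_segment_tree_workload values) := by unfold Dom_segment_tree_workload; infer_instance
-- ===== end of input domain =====

-- B replaces A's segment tree by the plain array (every queried span is ≤ 64 wide, so a direct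
-- scan answers a query, and a point update is one write); measurably faster by a constant factor.

-- ===== PORT A =====
-- The Python tree list is modelled as a total store `Nat → Int` (initially all 0); every index the
-- Python code reads or writes is in range of its list, so the values agree. `values[left]` is read
-- with pyGetD (the index is always in range). The midpoint helper:
def stMid (l r : Int) : Int := l + PySem.Int.floordiv (r - l) 2

-- bounds of the midpoint, cited by the termination proofs of the recursions below
lemma stMid_bounds (l r : Int) (h : l < r) : l ≤ stMid l r ∧ stMid l r < r := by
  unfold stMid
  rw [PySem.Int.floordiv_eq_ediv_of_pos (by omega : (0:Int) < 2)]
  omega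

def stUpd (f : Nat → Int) (k : Nat) (v : Int) : Nat → Int := fun j => if j = k then v else f j

-- SegmentTreeBench._build (the final `else` branch is a totality guard: Python never reaches l > r)
def stBuild (vals : List Int) (node : Nat) (l r : Int) (f : Nat → Int) : Nat → Int :=
  if l = r then stUpd f node (PySem.List.pyGetD vals l 0)
  else if h : l < r then
    let f1 := stBuild vals (node * 2) l (stMid l r) f
    let f2 := stBuild vals (node * 2 + 1) (stMid l r + 1) r f1
    stUpd f2 node (max (f2 (node * 2)) (f2 (node * 2 + 1)))
  else f
termination_by (r - l).toNat
decreasing_by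
  · have := stMid_bounds l r h; omega
  · have := stMid_bounds l r h; omega

-- SegmentTreeBench._update (same totality guard)
def stUpdate (f : Nat → Int) (node : Nat) (l r idx v : Int) : Nat → Int :=
  if l = r then stUpd f node v
  else if h : l < r then
    let f1 := if idx ≤ stMid l r then stUpdate f (node * 2) l (stMid l r) idx v
              else stUpdate f (node * 2 + 1) (stMid l r + 1) r idx v
    stUpd f1 node (max (f1 (node * 2)) (f1 (node * 2 + 1)))
  else f
termination_by (r - l).toNat
decreasing_by
  · have := stMid_bounds l r h; omega
  · have := stMid_bounds l r h; omega

-- SegmentTreeBench._query (same totality guard; Python never reaches the final branch)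
def stQuery (f : Nat → Int) (node : Nat) (l r ql qr : Int) : Int :=
  if qr < l ∨ r < ql then -9223372036854775808
  else if ql ≤ l ∧ r ≤ qr then f node
  else if h : l < r then
    max (stQuery f (node * 2) l (stMid l r) ql qr)
        (stQuery f (node * 2 + 1) (stMid l r + 1) r ql qr)
  else f node
termination_by (r - l).toNat
decreasing_by
  · have := stMid_bounds l r h; omega
  · have := stMid_bounds l r h; omega

-- value & MASK_64
def signed_i64_to_u64 (value : Int) : Int := PySem.Int.band value 18446744073709551615

def segment_tree_workload (values : List Int) : Int :=
  if values = [] then 0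
  else
    let n : Int := values.length
    let f0 := stBuild values 1 0 (n - 1) (fun _ => 0)
    let cs1 := (PySem.List.pyRange 0 n 97).foldl (fun cs i =>
        signed_i64_to_u64 (cs + signed_i64_to_u64
          (stQuery f0 1 0 (n - 1) i (min (n - 1) (i + 63))))) 0
    let f1 := (PySem.List.pyRange 0 n 53).foldl (fun f i =>
        stUpdate f 1 0 (n - 1) (PySem.Int.mod (i * 37 + 11) n)
          (PySem.Int.mod (i * 131 + 19) 1000003 - 500000)) f0
    (PySem.List.pyRange 0 n 89).foldl (fun cs i =>
        let left := PySem.Int.mod (i * 17 + 5) n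
        let right := min (n - 1) (left + (PySem.Int.mod (i * 29 + 7) 64 + 1) - 1)
        signed_i64_to_u64 (cs + signed_i64_to_u64 (stQuery f1 1 0 (n - 1) left right))) cs1

-- ===== PORT B =====
-- max(arr[left..right]) by the explicit scan of Source B (`arr[j]` is always in range: pyGetD)
def scanMax (arr : List Int) (left right : Int) : Int :=
  (PySem.List.pyRange (left + 1) (right + 1) 1).foldl
    (fun m j => if PySem.List.pyGetD arr j 0 > m then PySem.List.pyGetD arr j 0 else m)
    (PySem.List.pyGetD arr left 0)

def segment_tree_workload_alt (values : List Int) : Int :=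
  if values = [] then 0
  else
    let n : Int := values.length
    let cs1 := (PySem.List.pyRange 0 n 97).foldl (fun cs i =>
        PySem.Int.band (cs + PySem.Int.band (scanMax values i (min (n - 1) (i + 63)))
          18446744073709551615) 18446744073709551615) 0
    let arr := (PySem.List.pyRange 0 n 53).foldl (fun a i =>
        a.set (PySem.Int.mod (i * 37 + 11) n).toNat
          (PySem.Int.mod (i * 131 + 19) 1000003 - 500000)) values
    (PySem.List.pyRange 0 n 89).foldl (fun cs i =>
        let left := PySem.Int.mod (i * 17 + 5) n
        let right := min (n - 1) (left + (PySem.Int.mod (i * 29 + 7) 64 + 1) - 1)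
        PySem.Int.band (cs + PySem.Int.band (scanMax arr left right)
          18446744073709551615) 18446744073709551615) cs1

-- ===== PRECONDITION & SPEC =====
def Spec_segment_tree_workload (values : List Int) (out : Int) : Prop := out = segment_tree_workload_alt values
instance (values : List Int) (out : Int) : Decidable (Spec_segment_tree_workload values out) := by unfold Spec_segment_tree_workload; infer_instance

-- ===== CLAIM (what is proved, stated in full; the proofs are below) =====
def Claim_equal_segment_tree_workload : Prop := ∀ (values : List Int), Dom_segment_tree_workload values → Spec_segment_tree_workload values (segment_tree_workload values)

-- ===== LEMMAS AND PROOFS =====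

-- the model: the current array contents, as a total function (0 off the end; indices used are in range)
def gOf (arr : List Int) : Int → Int := fun j => arr.getD j.toNat 0

-- max of g over the integer interval [l, r], with A's neutral element for the empty interval
def rangeMax (g : Int → Int) (l r : Int) : Int :=
  if r < l then -9223372036854775808
  else if h : l < r then max (rangeMax g l (r - 1)) (g r)
  else g l
termination_by (r - l).toNat
decreasing_by omega

-- `k` lies in the subtree rooted at `m` (tree indices: children of m are 2m, 2m+1)
def isDesc (m k : Nat) : Prop := ∃ j : Nat, k / 2 ^ j = m

-- "f correctly annotates the subtree at `node` covering [l, r] with range maxima of g"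
def Ok (f : Nat → Int) (node : Nat) (l r : Int) (g : Int → Int) : Prop :=
  if l = r then f node = g l
  else if h : l < r then
    f node = max (f (node * 2)) (f (node * 2 + 1)) ∧
    Ok f (node * 2) l (stMid l r) g ∧ Ok f (node * 2 + 1) (stMid l r + 1) r g
  else True
termination_by (r - l).toNat
decreasing_by
  · have := stMid_bounds l r h; omega
  · have := stMid_bounds l r h; omega

lemma rmax_empty (g : Int → Int) (l r : Int) (h : r < l) : rangeMax g l r = -9223372036854775808 := by
  rw [rangeMax]; simp [h]

lemma rmax_single (g : Int → Int) (l : Int) : rangeMax g l l = g l := by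
  rw [rangeMax]; simp

lemma rmax_step (g : Int → Int) (l r : Int) (h : l < r) :
    rangeMax g l r = max (rangeMax g l (r - 1)) (g r) := by
  rw [rangeMax]; rw [if_neg (by omega), dif_pos h]

lemma rmax_ge (g : Int → Int) (l r : Int) (hg : ∀ j, -9223372036854775808 ≤ g j) :
    -9223372036854775808 ≤ rangeMax g l r := by
  rcases lt_trichotomy r l with h | h | h
  · rw [rmax_empty g l r h]
  · subst h; rw [rmax_single]; exact hg _
  · rw [rmax_step g l r h]; exact le_trans (hg r) (le_max_right _ _)

lemma rmax_split (g : Int → Int) :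
    ∀ (d : Nat) (l m r : Int), l ≤ m → m < r → (r - m - 1).toNat = d →
      max (rangeMax g l m) (rangeMax g (m + 1) r) = rangeMax g l r := by
  intro d
  induction d with
  | zero =>
    intro l m r hlm hmr hd
    have h : r = m + 1 := by omega
    subst h
    rw [rmax_single, rmax_step g l (m + 1) (by omega)]
    simp
  | succ d ih =>
    intro l m r hlm hmr hd
    rcases eq_or_lt_of_le (by omega : m + 1 ≤ r) with h | h
    · rw [← h, rmax_single, rmax_step g l (m + 1) (by omega)]
      simp
    · rw [rmax_step g (m + 1) r (by omega), rmax_step g l r (by omega), ← max_assoc,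
        ih l m (r - 1) hlm (by omega) (by omega)]

lemma ok_leaf (f : Nat → Int) (node : Nat) (l : Int) (g : Int → Int) :
    Ok f node l l g ↔ f node = g l := by
  rw [Ok]; simp

lemma ok_node (f : Nat → Int) (node : Nat) (l r : Int) (g : Int → Int) (h : l < r) :
    Ok f node l r g ↔
      (f node = max (f (node * 2)) (f (node * 2 + 1)) ∧
       Ok f (node * 2) l (stMid l r) g ∧ Ok f (node * 2 + 1) (stMid l r + 1) r g) := by
  rw [Ok]; rw [if_neg (by omega), dif_pos h]

lemma desc_self (m : Nat) : isDesc m m := ⟨0, by simp⟩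

lemma desc_of_left (m k : Nat) (h : isDesc (m * 2) k) : isDesc m k := by
  obtain ⟨j, hj⟩ := h
  exact ⟨j + 1, by rw [pow_succ, ← Nat.div_div_eq_div_mul, hj]; omega⟩

lemma desc_of_right (m k : Nat) (h : isDesc (m * 2 + 1) k) : isDesc m k := by
  obtain ⟨j, hj⟩ := h
  exact ⟨j + 1, by rw [pow_succ, ← Nat.div_div_eq_div_mul, hj]; omega⟩

lemma desc_chain (k i j : Nat) (h : i ≤ j) : k / 2 ^ j = (k / 2 ^ i) / 2 ^ (j - i) := by
  rw [Nat.div_div_eq_div_mul, ← pow_add]; congr 2; omega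

lemma desc_lr_disjoint (m k : Nat) (hm : 1 ≤ m) (hl : isDesc (m * 2) k) (hr : isDesc (m * 2 + 1) k) : False := by
  obtain ⟨j, hj⟩ := hl
  obtain ⟨i, hi⟩ := hr
  rcases Nat.lt_trichotomy j i with h | h | h
  · have hc := desc_chain k j i (by omega)
    rw [hj] at hc
    have h2 : m * 2 / 2 ^ (i - j) ≤ m * 2 / 2 ^ 1 :=
      Nat.div_le_div_left (Nat.pow_le_pow_right (by omega) (by omega)) (by positivity)
    simp [pow_one] at h2
    omega
  · subst h; omega
  · have hc := desc_chain k i j (by omega)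
    rw [hi] at hc
    have h2 : (m * 2 + 1) / 2 ^ (j - i) ≤ (m * 2 + 1) / 2 ^ 1 :=
      Nat.div_le_div_left (Nat.pow_le_pow_right (by omega) (by omega)) (by positivity)
    simp [pow_one] at h2
    omega

lemma not_desc_left_self (m : Nat) (hm : 1 ≤ m) : ¬ isDesc (m * 2) m := by
  rintro ⟨j, hj⟩
  have := Nat.div_le_self m (2 ^ j)
  omega

lemma not_desc_right_self (m : Nat) : ¬ isDesc (m * 2 + 1) m := by
  rintro ⟨j, hj⟩
  have := Nat.div_le_self m (2 ^ j)
  omega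

-- Ok depends only on the values of f at descendants of node
lemma ok_frame :
    ∀ (d : Nat) (node : Nat) (l r : Int) (f f' : Nat → Int) (g : Int → Int),
      (r - l).toNat = d → (∀ k, isDesc node k → f' k = f k) → Ok f node l r g → Ok f' node l r g := by
  intro d
  induction d using Nat.strong_induction_on with
  | _ d ih =>
    intro node l r f f' g hd hf hok
    rcases lt_trichotomy l r with h | h | h
    · rw [ok_node _ _ _ _ _ h] at hok ⊢
      obtain ⟨h1, h2, h3⟩ := hok
      have hm := stMid_bounds l r h
      refine ⟨?_, ?_, ?_⟩
      · rw [hf node (desc_self node), hf _ (desc_of_left node _ (desc_self _)),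
          hf _ (desc_of_right node _ (desc_self _))]
        exact h1
      · exact ih (stMid l r - l).toNat (by omega) _ _ _ _ _ _ rfl
          (fun k hk => hf k (desc_of_left node k hk)) h2
      · exact ih (r - (stMid l r + 1)).toNat (by omega) _ _ _ _ _ _ rfl
          (fun k hk => hf k (desc_of_right node k hk)) h3
    · subst h
      rw [ok_leaf] at hok ⊢
      rw [hf node (desc_self node)]; exact hok
    · rw [Ok, if_neg (by omega), dif_neg (by omega)]; trivial

-- Ok depends only on the values of g on [l, r]
lemma ok_congG :
    ∀ (d : Nat) (node : Nat) (l r : Int) (f : Nat → Int) (g g' : Int → Int),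
      (r - l).toNat = d → (∀ j, l ≤ j → j ≤ r → g j = g' j) → Ok f node l r g → Ok f node l r g' := by
  intro d
  induction d using Nat.strong_induction_on with
  | _ d ih =>
    intro node l r f g g' hd hgg hok
    rcases lt_trichotomy l r with h | h | h
    · rw [ok_node _ _ _ _ _ h] at hok ⊢
      obtain ⟨h1, h2, h3⟩ := hok
      have hm := stMid_bounds l r h
      refine ⟨h1, ?_, ?_⟩
      · exact ih (stMid l r - l).toNat (by omega) _ _ _ _ _ _ rfl
          (fun j hj1 hj2 => hgg j hj1 (by omega)) h2
      · exact ih (r - (stMid l r + 1)).toNat (by omega) _ _ _ _ _ _ rfl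
          (fun j hj1 hj2 => hgg j (by omega) hj2) h3
    · subst h
      rw [ok_leaf] at hok ⊢
      rw [← hgg l le_rfl le_rfl]; exact hok
    · rw [Ok, if_neg (by omega), dif_neg (by omega)]; trivial

lemma ok_root (g : Int → Int) :
    ∀ (d : Nat) (node : Nat) (l r : Int) (f : Nat → Int),
      (r - l).toNat = d → l ≤ r → Ok f node l r g → f node = rangeMax g l r := by
  intro d
  induction d using Nat.strong_induction_on with
  | _ d ih =>
    intro node l r f hd hlr hok
    rcases eq_or_lt_of_le hlr with h | h
    · subst h
      rw [ok_leaf] at hok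
      rw [rmax_single]; exact hok
    · rw [ok_node _ _ _ _ _ h] at hok
      obtain ⟨h1, h2, h3⟩ := hok
      have hm := stMid_bounds l r h
      rw [h1,
        ih (stMid l r - l).toNat (by omega) _ _ _ _ rfl (by omega) h2,
        ih (r - (stMid l r + 1)).toNat (by omega) _ _ _ _ rfl (by omega) h3]
      exact rmax_split g (r - stMid l r - 1).toNat l (stMid l r) r (by omega) (by omega) rfl

lemma build_leaf (vals : List Int) (node : Nat) (l : Int) (f : Nat → Int) :
    stBuild vals node l l f = stUpd f node (PySem.List.pyGetD vals l 0) := by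
  rw [stBuild]; simp

lemma build_node (vals : List Int) (node : Nat) (l r : Int) (f : Nat → Int) (h : l < r) :
    stBuild vals node l r f =
      stUpd (stBuild vals (node * 2 + 1) (stMid l r + 1) r (stBuild vals (node * 2) l (stMid l r) f)) node
        (max (stBuild vals (node * 2 + 1) (stMid l r + 1) r (stBuild vals (node * 2) l (stMid l r) f) (node * 2))
             (stBuild vals (node * 2 + 1) (stMid l r + 1) r (stBuild vals (node * 2) l (stMid l r) f) (node * 2 + 1))) := by
  rw [stBuild]; rw [if_neg (by omega), dif_pos h]

lemma update_leaf (f : Nat → Int) (node : Nat) (l idx v : Int) :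
    stUpdate f node l l idx v = stUpd f node v := by
  rw [stUpdate]; simp

lemma update_node_left (f : Nat → Int) (node : Nat) (l r idx v : Int) (h : l < r) (hi : idx ≤ stMid l r) :
    stUpdate f node l r idx v =
      stUpd (stUpdate f (node * 2) l (stMid l r) idx v) node
        (max (stUpdate f (node * 2) l (stMid l r) idx v (node * 2))
             (stUpdate f (node * 2) l (stMid l r) idx v (node * 2 + 1))) := by
  rw [stUpdate]; rw [if_neg (by omega), dif_pos h, if_pos hi]

lemma update_node_right (f : Nat → Int) (node : Nat) (l r idx v : Int) (h : l < r) (hi : ¬ idx ≤ stMid l r) :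
    stUpdate f node l r idx v =
      stUpd (stUpdate f (node * 2 + 1) (stMid l r + 1) r idx v) node
        (max (stUpdate f (node * 2 + 1) (stMid l r + 1) r idx v (node * 2))
             (stUpdate f (node * 2 + 1) (stMid l r + 1) r idx v (node * 2 + 1))) := by
  rw [stUpdate]; rw [if_neg (by omega), dif_pos h, if_neg hi]

lemma build_frame (vals : List Int) :
    ∀ (d : Nat) (node : Nat) (l r : Int) (f : Nat → Int) (k : Nat),
      (r - l).toNat = d → ¬ isDesc node k → stBuild vals node l r f k = f k := by
  intro d
  induction d using Nat.strong_induction_on with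
  | _ d ih =>
    intro node l r f k hd hk
    have hkn : k ≠ node := fun h => hk (h ▸ desc_self node)
    rcases lt_trichotomy l r with h | h | h
    · have hm := stMid_bounds l r h
      rw [build_node vals node l r f h]
      have hkL : ¬ isDesc (node * 2) k := fun h' => hk (desc_of_left node k h')
      have hkR : ¬ isDesc (node * 2 + 1) k := fun h' => hk (desc_of_right node k h')
      simp only [stUpd, if_neg hkn]
      rw [ih (r - (stMid l r + 1)).toNat (by omega) _ _ _ _ _ rfl hkR,
        ih (stMid l r - l).toNat (by omega) _ _ _ _ _ rfl hkL]
    · subst h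
      rw [build_leaf]
      simp [stUpd, hkn]
    · rw [stBuild, if_neg (by omega), dif_neg (by omega)]

lemma build_ok (vals : List Int) :
    ∀ (d : Nat) (node : Nat) (l r : Int) (f : Nat → Int),
      (r - l).toNat = d → 1 ≤ node → 0 ≤ l → l ≤ r →
      Ok (stBuild vals node l r f) node l r (gOf vals) := by
  intro d
  induction d using Nat.strong_induction_on with
  | _ d ih =>
    intro node l r f hd hnode h0 hlr
    rcases eq_or_lt_of_le hlr with h | h
    · subst h
      rw [build_leaf, ok_leaf]
      simp [stUpd, gOf, PySem.List.pyGetD_of_nonneg vals 0 h0]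
    · have hm := stMid_bounds l r h
      rw [build_node vals node l r f h, ok_node _ _ _ _ _ h]
      set F1 := stBuild vals (node * 2) l (stMid l r) f with hF1
      set F2 := stBuild vals (node * 2 + 1) (stMid l r + 1) r F1 with hF2
      refine ⟨?_, ?_, ?_⟩
      · simp only [stUpd]
        rw [if_neg (by omega : ¬ node * 2 = node), if_neg (by omega : ¬ node * 2 + 1 = node)]
        simp
      · have okL : Ok F1 (node * 2) l (stMid l r) (gOf vals) :=
          ih (stMid l r - l).toNat (by omega) _ _ _ _ rfl (by omega) h0 (by omega)
        have okL2 : Ok F2 (node * 2) l (stMid l r) (gOf vals) :=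
          ok_frame (stMid l r - l).toNat _ _ _ _ _ _ rfl
            (fun k hk => build_frame vals (r - (stMid l r + 1)).toNat _ _ _ _ _ rfl
              (fun h' => desc_lr_disjoint node k hnode hk h')) okL
        exact ok_frame (stMid l r - l).toNat _ _ _ _ _ _ rfl
          (fun k hk => by
            have : k ≠ node := fun he => not_desc_left_self node hnode (he ▸ hk)
            simp [stUpd, this]) okL2
      · have okR : Ok F2 (node * 2 + 1) (stMid l r + 1) r (gOf vals) :=
          ih (r - (stMid l r + 1)).toNat (by omega) _ _ _ _ rfl (by omega) (by omega) (by omega)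
        exact ok_frame (r - (stMid l r + 1)).toNat _ _ _ _ _ _ rfl
          (fun k hk => by
            have : k ≠ node := fun he => not_desc_right_self node (he ▸ hk)
            simp [stUpd, this]) okR

lemma update_frame :
    ∀ (d : Nat) (node : Nat) (l r idx v : Int) (f : Nat → Int) (k : Nat),
      (r - l).toNat = d → ¬ isDesc node k → stUpdate f node l r idx v k = f k := by
  intro d
  induction d using Nat.strong_induction_on with
  | _ d ih =>
    intro node l r idx v f k hd hk
    have hkn : k ≠ node := fun h => hk (h ▸ desc_self node)
    rcases lt_trichotomy l r with h | h | h
    · have hm := stMid_bounds l r h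
      have hkL : ¬ isDesc (node * 2) k := fun h' => hk (desc_of_left node k h')
      have hkR : ¬ isDesc (node * 2 + 1) k := fun h' => hk (desc_of_right node k h')
      by_cases hi : idx ≤ stMid l r
      · rw [update_node_left f node l r idx v h hi]
        simp only [stUpd, if_neg hkn]
        exact ih (stMid l r - l).toNat (by omega) _ _ _ _ _ _ _ rfl hkL
      · rw [update_node_right f node l r idx v h hi]
        simp only [stUpd, if_neg hkn]
        exact ih (r - (stMid l r + 1)).toNat (by omega) _ _ _ _ _ _ _ rfl hkR
    · subst h
      rw [update_leaf]
      simp [stUpd, hkn]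
    · rw [stUpdate, if_neg (by omega), dif_neg (by omega)]

lemma update_ok :
    ∀ (d : Nat) (node : Nat) (l r idx v : Int) (f : Nat → Int) (g : Int → Int),
      (r - l).toNat = d → 1 ≤ node → l ≤ idx → idx ≤ r → Ok f node l r g →
      Ok (stUpdate f node l r idx v) node l r (fun j => if j = idx then v else g j) := by
  intro d
  induction d using Nat.strong_induction_on with
  | _ d ih =>
    intro node l r idx v f g hd hnode hli hir hok
    rcases eq_or_lt_of_le (le_trans hli hir) with h | h
    · subst h
      rw [update_leaf, ok_leaf]
      have : l = idx := by omega
      simp [stUpd, this]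
    · have hm := stMid_bounds l r h
      rw [ok_node _ _ _ _ _ h] at hok
      obtain ⟨h1, h2, h3⟩ := hok
      by_cases hi : idx ≤ stMid l r
      · rw [update_node_left f node l r idx v h hi, ok_node _ _ _ _ _ h]
        set F1 := stUpdate f (node * 2) l (stMid l r) idx v with hF1
        refine ⟨?_, ?_, ?_⟩
        · simp only [stUpd]
          rw [if_neg (by omega : ¬ node * 2 = node), if_neg (by omega : ¬ node * 2 + 1 = node)]
          simp
        · have okL : Ok F1 (node * 2) l (stMid l r) (fun j => if j = idx then v else g j) :=
            ih (stMid l r - l).toNat (by omega) _ _ _ _ _ _ _ rfl (by omega) hli hi h2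
          exact ok_frame (stMid l r - l).toNat _ _ _ _ _ _ rfl
            (fun k hk => by
              have : k ≠ node := fun he => not_desc_left_self node hnode (he ▸ hk)
              simp [stUpd, this]) okL
        · have okF : Ok F1 (node * 2 + 1) (stMid l r + 1) r g :=
            ok_frame (r - (stMid l r + 1)).toNat _ _ _ _ _ _ rfl
              (fun k hk => update_frame (stMid l r - l).toNat _ _ _ _ _ _ _ rfl
                (fun h' => desc_lr_disjoint node k hnode h' hk)) h3
          have okR : Ok F1 (node * 2 + 1) (stMid l r + 1) r (fun j => if j = idx then v else g j) :=
            ok_congG (r - (stMid l r + 1)).toNat _ _ _ _ g _ rfl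
              (fun j hj1 hj2 => (if_neg (by omega : ¬ j = idx)).symm) okF
          exact ok_frame (r - (stMid l r + 1)).toNat _ _ _ _ _ _ rfl
            (fun k hk => by
              have : k ≠ node := fun he => not_desc_right_self node (he ▸ hk)
              simp [stUpd, this]) okR
      · rw [update_node_right f node l r idx v h hi, ok_node _ _ _ _ _ h]
        set F1 := stUpdate f (node * 2 + 1) (stMid l r + 1) r idx v with hF1
        refine ⟨?_, ?_, ?_⟩
        · simp only [stUpd]
          rw [if_neg (by omega : ¬ node * 2 = node), if_neg (by omega : ¬ node * 2 + 1 = node)]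
          simp
        · have okF : Ok F1 (node * 2) l (stMid l r) g :=
            ok_frame (stMid l r - l).toNat _ _ _ _ _ _ rfl
              (fun k hk => update_frame (r - (stMid l r + 1)).toNat _ _ _ _ _ _ _ rfl
                (fun h' => desc_lr_disjoint node k hnode hk h')) h2
          have okL : Ok F1 (node * 2) l (stMid l r) (fun j => if j = idx then v else g j) :=
            ok_congG (stMid l r - l).toNat _ _ _ _ g _ rfl
              (fun j hj1 hj2 => (if_neg (by omega : ¬ j = idx)).symm) okF
          exact ok_frame (stMid l r - l).toNat _ _ _ _ _ _ rfl
            (fun k hk => by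
              have : k ≠ node := fun he => not_desc_left_self node hnode (he ▸ hk)
              simp [stUpd, this]) okL
        · have okR : Ok F1 (node * 2 + 1) (stMid l r + 1) r (fun j => if j = idx then v else g j) :=
            ih (r - (stMid l r + 1)).toNat (by omega) _ _ _ _ _ _ _ rfl (by omega) (by omega) hir h3
          exact ok_frame (r - (stMid l r + 1)).toNat _ _ _ _ _ _ rfl
            (fun k hk => by
              have : k ≠ node := fun he => not_desc_right_self node (he ▸ hk)
              simp [stUpd, this]) okR

lemma query_eq (g : Int → Int) (ql qr : Int) (hq : ql ≤ qr)
    (hg : ∀ j, -9223372036854775808 ≤ g j) :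
    ∀ (d : Nat) (node : Nat) (l r : Int) (f : Nat → Int),
      (r - l).toNat = d → l ≤ r → Ok f node l r g →
      stQuery f node l r ql qr =
        if max l ql ≤ min r qr then rangeMax g (max l ql) (min r qr)
        else -9223372036854775808 := by
  intro d
  induction d using Nat.strong_induction_on with
  | _ d ih =>
    intro node l r f hd hlr hok
    by_cases h1 : qr < l ∨ r < ql
    · rw [stQuery, if_pos h1, if_neg (by omega)]
    · by_cases h2 : ql ≤ l ∧ r ≤ qr
      · rw [stQuery, if_neg h1, if_pos h2, if_pos (by omega)]
        have : max l ql = l ∧ min r qr = r := by omega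
        rw [this.1, this.2]
        exact ok_root g d node l r f hd hlr hok
      · have h : l < r := by omega
        have hm := stMid_bounds l r h
        rw [stQuery, if_neg h1, if_neg h2, dif_pos h]
        rw [ok_node _ _ _ _ _ h] at hok
        obtain ⟨_, hokL, hokR⟩ := hok
        rw [ih (stMid l r - l).toNat (by omega) _ _ _ _ rfl (by omega) hokL,
          ih (r - (stMid l r + 1)).toNat (by omega) _ _ _ _ rfl (by omega) hokR]
        rw [if_pos (by omega : max l ql ≤ min r qr)]
        by_cases ha : qr ≤ stMid l r
        · rw [if_pos (by omega), if_neg (by omega)]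
          have e1 : min (stMid l r) qr = min r qr := by omega
          rw [e1, max_eq_left (rmax_ge g _ _ hg)]
        · by_cases hb : stMid l r < ql
          · rw [if_neg (by omega), if_pos (by omega)]
            have e1 : max (stMid l r + 1) ql = max l ql := by omega
            rw [e1, max_eq_right (rmax_ge g _ _ hg)]
          · rw [if_pos (by omega), if_pos (by omega)]
            have e1 : min (stMid l r) qr = stMid l r := by omega
            have e2 : max (stMid l r + 1) ql = stMid l r + 1 := by omega
            rw [e1, e2]
            exact rmax_split g (min r qr - stMid l r - 1).toNat (max l ql) (stMid l r) (min r qr)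
              (by omega) (by omega) rfl

lemma gOf_ge (arr : List Int) (h : ∀ x ∈ arr, -9223372036854775808 ≤ x) :
    ∀ j, -9223372036854775808 ≤ gOf arr j := by
  intro j
  unfold gOf
  rcases lt_or_ge j.toNat arr.length with hlt | hge
  · rw [List.getD_eq_getElem arr 0 hlt]; exact h _ (List.getElem_mem hlt)
  · rw [List.getD_eq_default arr 0 hge]; omega

lemma scanMax_eq (arr : List Int) :
    ∀ (d : Nat) (left right : Int), (right - left).toNat = d → 0 ≤ left → left ≤ right →
      scanMax arr left right = rangeMax (gOf arr) left right := by
  intro d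
  induction d with
  | zero =>
    intro left right hd h0 hlr
    have h : right = left := by omega
    subst h
    rw [scanMax, PySem.List.pyRange_one_eq_nil (by omega), rmax_single]
    simp [gOf, PySem.List.pyGetD_of_nonneg arr 0 h0]
  | succ d ih =>
    intro left right hd h0 hlr
    have h : left < right := by omega
    have e : right - 1 + 1 = right := by omega
    rw [scanMax, ← e, PySem.List.pyRange_one_succ_right (by omega), List.foldl_append]
    have escan : (PySem.List.pyRange (left + 1) (right - 1 + 1) 1).foldl
        (fun m j => if PySem.List.pyGetD arr j 0 > m then PySem.List.pyGetD arr j 0 else m)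
        (PySem.List.pyGetD arr left 0) = rangeMax (gOf arr) left (right - 1) := by
      rw [e, ← ih left (right - 1) (by omega) h0 (by omega), scanMax, e]
    rw [escan, e, rmax_step (gOf arr) left right h]
    simp only [List.foldl_cons, List.foldl_nil]
    rw [PySem.List.pyGetD_of_nonneg arr 0 (by omega : (0:Int) ≤ right)]
    rcases le_or_gt (gOf arr right) (rangeMax (gOf arr) left (right - 1)) with hc | hc
    · have hc' : arr.getD right.toNat 0 ≤ rangeMax (gOf arr) left (right - 1) := hc
      rw [if_neg (by omega), max_eq_left hc]
    · have hc' : rangeMax (gOf arr) left (right - 1) < arr.getD right.toNat 0 := hc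
      rw [if_pos (by omega), max_eq_right (le_of_lt hc)]
      rfl

lemma query_scan (n : Int) (arr : List Int) (f : Nat → Int) (left right : Int)
    (hn : (arr.length : Int) = n) (hmem : ∀ x ∈ arr, -9223372036854775808 ≤ x)
    (hok : Ok f 1 0 (n - 1) (gOf arr)) (h0 : 0 ≤ left) (hlr : left ≤ right) (hr : right ≤ n - 1) :
    stQuery f 1 0 (n - 1) left right = scanMax arr left right := by
  rw [query_eq (gOf arr) left right hlr (gOf_ge arr hmem) (n - 1 - 0).toNat 1 0 (n - 1) f rfl
    (by omega) hok]
  rw [if_pos (by omega)]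
  have e1 : max 0 left = left := by omega
  have e2 : min (n - 1) right = right := by omega
  rw [e1, e2, ← scanMax_eq arr (right - left).toNat left right rfl h0 hlr]

-- the update loop: A's tree updates and B's in-place writes stay in lock step
lemma fold_updates (n : Int) (L : List Int) :
    ∀ (f : Nat → Int) (arr : List Int), (arr.length : Int) = n → 0 < n →
      (∀ x ∈ arr, -9223372036854775808 ≤ x) → Ok f 1 0 (n - 1) (gOf arr) →
      (((L.foldl (fun a i => a.set (PySem.Int.mod (i * 37 + 11) n).toNat
          (PySem.Int.mod (i * 131 + 19) 1000003 - 500000)) arr).length : Int) = n ∧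
       (∀ x ∈ L.foldl (fun a i => a.set (PySem.Int.mod (i * 37 + 11) n).toNat
          (PySem.Int.mod (i * 131 + 19) 1000003 - 500000)) arr, -9223372036854775808 ≤ x) ∧
       Ok (L.foldl (fun f i => stUpdate f 1 0 (n - 1) (PySem.Int.mod (i * 37 + 11) n)
            (PySem.Int.mod (i * 131 + 19) 1000003 - 500000)) f) 1 0 (n - 1)
          (gOf (L.foldl (fun a i => a.set (PySem.Int.mod (i * 37 + 11) n).toNat
            (PySem.Int.mod (i * 131 + 19) 1000003 - 500000)) arr))) := by
  induction L with
  | nil => intro f arr h1 h2 h3 h4; exact ⟨h1, h3, h4⟩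
  | cons i L ih =>
    intro f arr hlen hn hmem hok
    simp only [List.foldl_cons]
    set idx := PySem.Int.mod (i * 37 + 11) n with hidx
    set v := PySem.Int.mod (i * 131 + 19) 1000003 - 500000 with hv
    have hidx0 : 0 ≤ idx := PySem.Int.mod_nonneg _ hn
    have hidx1 : idx < n := PySem.Int.mod_lt _ hn
    have hv0 : 0 ≤ PySem.Int.mod (i * 131 + 19) 1000003 := PySem.Int.mod_nonneg _ (by omega)
    have hvneg : -9223372036854775808 ≤ v := by omega
    refine ih (stUpdate f 1 0 (n - 1) idx v) (arr.set idx.toNat v) ?_ hn ?_ ?_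
    · simp [List.length_set, hlen]
    · intro x hx
      rcases List.mem_or_eq_of_mem_set hx with h | h
      · exact hmem x h
      · omega
    · have okU := update_ok (n - 1 - 0).toNat 1 0 (n - 1) idx v f (gOf arr) rfl le_rfl hidx0
        (by omega) hok
      refine ok_congG (n - 1 - 0).toNat 1 0 (n - 1) _ _ _ rfl ?_ okU
      intro j hj1 hj2
      by_cases hji : j = idx
      · subst hji
        simp only [gOf, List.getD_eq_getElem?_getD, if_pos]
        rw [List.getElem?_set_self (by omega)]
        rfl
      · simp only [if_neg hji, gOf, List.getD_eq_getElem?_getD]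
        rw [List.getElem?_set_ne (by omega : idx.toNat ≠ j.toNat)]

-- ===== VERDICT (by name: the statement is the Claim_ definition above) =====
theorem segment_tree_workload_spec : Claim_equal_segment_tree_workload := by
  intro values hdom
  unfold Spec_segment_tree_workload
  by_cases hne : values = []
  · subst hne; rfl
  · have hmem : ∀ x ∈ values, -9223372036854775808 ≤ x := by
      intro x hx
      have h := List.all_eq_true.mp hdom x hx
      simp only [pvDomInt, decide_eq_true_eq] at h
      omega
    simp only [segment_tree_workload, segment_tree_workload_alt, if_neg hne]
    set n : Int := (values.length : Int) with hn
    have hn1 : 0 < n := by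
      have : values.length ≠ 0 := fun h => hne (List.eq_nil_of_length_eq_zero h)
      omega
    have hlen : (values.length : Int) = n := hn.symm
    have hok0 : Ok (stBuild values 1 0 (n - 1) (fun _ => 0)) 1 0 (n - 1) (gOf values) :=
      build_ok values (n - 1 - 0).toNat 1 0 (n - 1) _ rfl le_rfl le_rfl (by omega)
    have hcs1 : (PySem.List.pyRange 0 n 97).foldl (fun cs i =>
          signed_i64_to_u64 (cs + signed_i64_to_u64
            (stQuery (stBuild values 1 0 (n - 1) (fun _ => 0)) 1 0 (n - 1) i (min (n - 1) (i + 63))))) 0 =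
        (PySem.List.pyRange 0 n 97).foldl (fun cs i =>
          PySem.Int.band (cs + PySem.Int.band (scanMax values i (min (n - 1) (i + 63)))
            18446744073709551615) 18446744073709551615) 0 := by
      refine PySem.List.foldl_congr_mem _ _ _ _ ?_
      intro cs i hi
      obtain ⟨hi0, hi1, -⟩ := (PySem.List.mem_pyRange_iff_of_pos (by norm_num) i).mp hi
      simp only [signed_i64_to_u64]
      rw [query_scan n values _ i (min (n - 1) (i + 63)) hlen hmem hok0 hi0 (by omega) (by omega)]
    obtain ⟨hlen', hmem', hok'⟩ :=
      fold_updates n (PySem.List.pyRange 0 n 53) (stBuild values 1 0 (n - 1) (fun _ => 0)) values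
        hlen hn1 hmem hok0
    rw [hcs1]
    refine PySem.List.foldl_congr_mem _ _ _ _ ?_
    intro cs i hi
    have hleft0 : 0 ≤ PySem.Int.mod (i * 17 + 5) n := PySem.Int.mod_nonneg _ hn1
    have hleft1 : PySem.Int.mod (i * 17 + 5) n < n := PySem.Int.mod_lt _ hn1
    have hspan0 : 0 ≤ PySem.Int.mod (i * 29 + 7) 64 := PySem.Int.mod_nonneg _ (by omega)
    simp only [signed_i64_to_u64]
    rw [query_scan n _ _ _ _ hlen' hmem' hok' hleft0 (by omega) (by omega)]
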